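-- pv_equiv track=rewrite | github.com/liupengsay/PyIsTheBestLang | src/dp/state_dp/problem.py | lc_1434_2
-- ===== SOURCE A (Python) =====
-- from typing import List
--
-- def lc_1434_2(hats: List[List[int]]) -> int:
--     """
--     url: https://leetcode.cn/problems/number-of-ways-to-wear-different-hats-to-each-other/description/
--     tag: state_dp|reverse_thinking
--     """
--     # state_compressreverse_thinking，fill_table迭代实现
--     mod = 10 ** 9 + 7
--     n = len(hats)
--     people = [[] for _ in range(40)]
--     for u in range(n):
--         for v in hats[u]:
--             people[v - 1].append(u)
--
--     dp = [[0] * (1 << n) for _ in range(41)]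
--     dp[0][0] = 1
--     for i in range(40):
--         for j in range(1 << n):
--             dp[i + 1][j] = dp[i][j]
--             for x in people[i]:
--                 if (1 << x) & j:
--                     dp[i + 1][j] += dp[i][j ^ (1 << x)]
--                     dp[i + 1][j] %= mod
--
--     return dp[-1][-1]
-- ===== SOURCE B (Python) =====
-- from typing import List
--
-- def lc_1434_2(hats: List[List[int]]) -> int:
--     # Top-down memoized recursion over hats: dfs(i, mask) = number of ways to use
--     # hats i..39 to serve exactly the people still present in mask.
--     mod = 10 ** 9 + 7
--     n = len(hats)
--     people = [[] for _ in range(40)]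
--     for u in range(n):
--         for v in hats[u]:
--             people[v - 1].append(u)
--
--     cache = {}
--
--     def dfs(i, mask):
--         if i == 40:
--             return 1 if mask == 0 else 0
--         key = (i, mask)
--         if key not in cache:
--             s = dfs(i + 1, mask)
--             for x in people[i]:
--                 if (1 << x) & mask:
--                     s = (s + dfs(i + 1, mask ^ (1 << x))) % mod
--             cache[key] = s
--         return cache[key]
--
--     return dfs(0, (1 << n) - 1)
-- ===== Notes on version B (the rewrite author's own statement) =====
-- stated objective: alternative
-- what changed: A's bottom-up fill of the prefix table dp[i][j] (ways to hand out hats 0..i-1 to exactly the people in j) is replaced by a top-down memoized recursion dfs(i, mask) counting ways to use hats i..39 to serve exactly the people left in mask; the two recurrences run in opposite directions and the proof links them by a convolution invariant.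
import Mathlib
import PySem

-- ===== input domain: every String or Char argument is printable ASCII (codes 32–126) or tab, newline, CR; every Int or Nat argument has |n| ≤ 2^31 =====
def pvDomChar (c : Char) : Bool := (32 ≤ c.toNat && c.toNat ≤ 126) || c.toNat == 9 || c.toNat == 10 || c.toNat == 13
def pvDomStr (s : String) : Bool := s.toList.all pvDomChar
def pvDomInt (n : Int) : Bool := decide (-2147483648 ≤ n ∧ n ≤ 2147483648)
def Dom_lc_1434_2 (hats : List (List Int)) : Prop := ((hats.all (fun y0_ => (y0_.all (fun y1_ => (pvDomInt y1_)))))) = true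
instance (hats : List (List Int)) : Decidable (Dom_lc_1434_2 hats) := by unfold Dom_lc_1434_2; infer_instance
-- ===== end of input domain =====

-- B replaces A's bottom-up prefix-table fill with a top-down memoized recursion
-- over hats (dfs(i, mask) = ways to use hats i..39 for the people left in mask);
-- alternative decomposition, not faster.

-- Shared setup (identical lines in both Pythons): people[v-1].append(u), with
-- Python index semantics (negative wrap, no-op exactly where Python raises — Pre_ excludes that).
def pvAppendAt (ps : List (List Nat)) (idx : Int) (u : Nat) : List (List Nat) :=
  PySem.List.pySetD ps idx (PySem.List.pyGetD ps idx [] ++ [u])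

-- 'for u in range(n): for v in hats[u]: people[v-1].append(u)' — the counter u is the
-- running index of the row, kept as a Nat (exact: u ranges over 0..n-1).
def pvPeople (hats : List (List Int)) : List (List Nat) :=
  (hats.foldl (fun (st : List (List Nat) × Nat) row =>
      (row.foldl (fun ps v => pvAppendAt ps (v - 1) st.2) st.1, st.2 + 1))
    (List.replicate 40 [], 0)).1

def pvMod : Int := 1000000007

-- ===== PORT A =====
-- row i+1 of A's table from row i: 'for j in range(1 << n): dp[i+1][j] = dp[i][j]; for x in people[i]: …'
-- (range over Nat is exact: the bound 1 << n is nonnegative; row reads are in range, getD default never used on Pre_)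
def pvStepA (people : List (List Nat)) (n : Nat) (prev : List Int) (i : Nat) : List Int :=
  (List.range (2 ^ n)).map (fun j =>
    (people.getD i []).foldl
      (fun acc x => if (1 <<< x) &&& j ≠ 0
        then PySem.Int.mod (acc + prev.getD (j ^^^ (1 <<< x)) 0) pvMod else acc)
      (prev.getD j 0))

-- rows dp[0], dp[1], …: dp[0] is [1, 0, …, 0] of length 1 << n
def pvRowsA (people : List (List Nat)) (n : Nat) : Nat → List Int
  | 0 => (List.range (2 ^ n)).map (fun j => if j = 0 then (1 : Int) else 0)
  | i + 1 => pvStepA people n (pvRowsA people n i) i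

-- dp[-1][-1]: last entry of row 40; the row has length 2^n ≥ 1, so this is index 2^n - 1
def lc_1434_2 (hats : List (List Int)) : Int :=
  (pvRowsA (pvPeople hats) hats.length 40).getD (2 ^ hats.length - 1) 0

-- ===== PORT B =====
-- 'def dfs(i, mask): …' threading the memo dict 'cache' through the calls; structural
-- fuel is 40 - i (the Python recursion bottoms out at i == 40), so at fuel + 1 the
-- current hat index i is 39 - fuel. The cache is Python's plain dict keyed by (i, mask).
def pvDfsB (people : List (List Nat)) :
    Nat → Nat → PySem.Dict (Nat × Nat) Int → Int × PySem.Dict (Nat × Nat) Int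
  | 0, mask, cache => ((if mask = 0 then 1 else 0), cache)
  | fuel + 1, mask, cache =>
      match PySem.Dict.get? cache (39 - fuel, mask) with
      | some v => (v, cache)
      | none =>
        let r0 := pvDfsB people fuel mask cache
        let r := (people.getD (39 - fuel) []).foldl
            (fun (p : Int × PySem.Dict (Nat × Nat) Int) x =>
              if (1 <<< x) &&& mask ≠ 0 then
                let q := pvDfsB people fuel (mask ^^^ (1 <<< x)) p.2
                (PySem.Int.mod (p.1 + q.1) pvMod, q.2)
              else p) r0
        (r.1, PySem.Dict.insert r.2 (39 - fuel, mask) r.1)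

-- return dfs(0, (1 << n) - 1)
def lc_1434_2_alt (hats : List (List Int)) : Int :=
  (pvDfsB (pvPeople hats) 40 (2 ^ hats.length - 1) PySem.Dict.empty).1

-- ===== PRECONDITION & SPEC =====
-- Pre_ excludes exactly the inputs where people[v-1] raises IndexError in both Pythons
-- (a hat value v with v > 40 or v < -39); A returns on every input Pre_ admits.
def Pre_lc_1434_2 (hats : List (List Int)) : Prop :=
  ∀ row ∈ hats, ∀ v ∈ row, -39 ≤ v ∧ v ≤ 40

instance (hats : List (List Int)) : Decidable (Pre_lc_1434_2 hats) := by
  unfold Pre_lc_1434_2; infer_instance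

def pvWitness_lc_1434_2 : List (List Int) := [[3, 4], [4, 5], [5]]

def Spec_lc_1434_2 (hats : List (List Int)) (out : Int) : Prop := out = lc_1434_2_alt hats
instance (hats : List (List Int)) (out : Int) : Decidable (Spec_lc_1434_2 hats out) := by
  unfold Spec_lc_1434_2; infer_instance

-- ===== CLAIM (what is proved, stated in full; the proofs are below) =====
def Claim_equal_lc_1434_2 : Prop :=
  ∀ (hats : List (List Int)), Dom_lc_1434_2 hats → Pre_lc_1434_2 hats →
    Spec_lc_1434_2 hats (lc_1434_2 hats)

-- ===== LEMMAS AND PROOFS =====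

-- A's table as a function: pvF people i j = dp[i][j]
def pvF (people : List (List Nat)) : Nat → Nat → Int
  | 0, j => if j = 0 then 1 else 0
  | i + 1, j => (people.getD i []).foldl
      (fun acc x => if (1 <<< x) &&& j ≠ 0
        then PySem.Int.mod (acc + pvF people i (j ^^^ (1 <<< x))) pvMod else acc)
      (pvF people i j)

-- B's recursion without the cache: pvG people (40 - i) mask = dfs(i, mask)
def pvG (people : List (List Nat)) : Nat → Nat → Int
  | 0, mask => if mask = 0 then 1 else 0
  | fuel + 1, mask => (people.getD (39 - fuel) []).foldl
      (fun s x => if (1 <<< x) &&& mask ≠ 0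
        then PySem.Int.mod (s + pvG people fuel (mask ^^^ (1 <<< x))) pvMod else s)
      (pvG people fuel mask)

lemma pv_mem_pySetD {α : Type} (xs : List α) (i : Int) (v a : α)
    (h : a ∈ PySem.List.pySetD xs i v) : a ∈ xs ∨ a = v := by
  unfold PySem.List.pySetD PySem.List.pySet? at h
  cases hk : PySem.List.pyIdx? xs.length i with
  | none => rw [hk] at h; simp at h; exact Or.inl h
  | some k => rw [hk] at h; simp at h; exact List.mem_or_eq_of_mem_set h

lemma pv_mem_pyGetD (ps : List (List Nat)) (i : Int) (x : Nat)
    (h : x ∈ PySem.List.pyGetD ps i ([] : List Nat)) : ∃ l ∈ ps, x ∈ l := by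
  unfold PySem.List.pyGetD at h
  cases hg : PySem.List.pyGet? ps i with
  | none => rw [hg] at h; simp at h
  | some l => rw [hg] at h; simp at h
              exact ⟨l, PySem.List.mem_of_pyGet?_eq_some ps hg, h⟩

lemma pv_appendAt_bound (ps : List (List Nat)) (idx : Int) (u c : Nat)
    (hps : ∀ l ∈ ps, ∀ x ∈ l, x < c) (hu : u < c) :
    ∀ l ∈ pvAppendAt ps idx u, ∀ x ∈ l, x < c := by
  intro l hl x hx
  rcases pv_mem_pySetD _ _ _ _ hl with h | rfl
  · exact hps l h x hx
  · rcases List.mem_append.1 hx with h | h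
    · obtain ⟨l', hl', hx'⟩ := pv_mem_pyGetD _ _ _ h
      exact hps l' hl' x hx'
    · simp at h; omega

lemma pv_row_fold_bound (row : List Int) (ps : List (List Nat)) (u c : Nat)
    (hps : ∀ l ∈ ps, ∀ x ∈ l, x < c) (hu : u < c) :
    ∀ l ∈ row.foldl (fun ps v => pvAppendAt ps (v - 1) u) ps, ∀ x ∈ l, x < c := by
  induction row generalizing ps with
  | nil => exact hps
  | cons v t ih => exact ih _ (pv_appendAt_bound ps (v - 1) u c hps hu)

lemma pv_build_bound (rows : List (List Int)) (ps : List (List Nat)) (c : Nat)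
    (hps : ∀ l ∈ ps, ∀ x ∈ l, x < c) :
    (rows.foldl (fun (st : List (List Nat) × Nat) row =>
        (row.foldl (fun ps v => pvAppendAt ps (v - 1) st.2) st.1, st.2 + 1)) (ps, c)).2
      = c + rows.length ∧
    ∀ l ∈ (rows.foldl (fun (st : List (List Nat) × Nat) row =>
        (row.foldl (fun ps v => pvAppendAt ps (v - 1) st.2) st.1, st.2 + 1)) (ps, c)).1,
      ∀ x ∈ l, x < c + rows.length := by
  induction rows generalizing ps c with
  | nil => exact ⟨rfl, by simpa using hps⟩
  | cons row t ih =>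
      have h1 : ∀ l ∈ row.foldl (fun ps v => pvAppendAt ps (v - 1) c) ps, ∀ x ∈ l, x < c + 1 :=
        pv_row_fold_bound row ps c (c + 1) (fun l hl x hx => Nat.lt_succ_of_lt (hps l hl x hx))
          (Nat.lt_succ_self c)
      obtain ⟨ha, hb⟩ := ih _ _ h1
      constructor
      · simp only [List.foldl_cons, ha, List.length_cons]; omega
      · intro l hl x hx
        have := hb l (by simpa using hl) x hx
        simp only [List.length_cons]; omega

lemma pvPeople_bound (hats : List (List Int)) :
    ∀ l ∈ pvPeople hats, ∀ x ∈ l, x < hats.length := by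
  have := pv_build_bound hats (List.replicate 40 []) 0 (by simp)
  intro l hl x hx
  have := this.2 l hl x hx
  omega

lemma pv_mem_getD_nat (ps : List (List Nat)) (i : Nat) (x : Nat)
    (h : x ∈ ps.getD i ([] : List Nat)) : ∃ l ∈ ps, x ∈ l := by
  unfold List.getD at h
  cases hg : ps[i]? with
  | none => rw [hg] at h; simp at h
  | some l => rw [hg] at h; simp at h
              exact ⟨l, List.mem_of_getElem? hg, h⟩

lemma pv_shift_eq (x : Nat) : (1 <<< x) = 2 ^ x := Nat.one_shiftLeft x

lemma pv_cond_iff (j x : Nat) : ((1 <<< x) &&& j ≠ 0) ↔ j.testBit x = true := by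
  rw [pv_shift_eq, Nat.land_comm, Nat.and_two_pow]
  cases h : j.testBit x <;> simp

lemma pv_xor_lt_pow (j x n : Nat) (hj : j < 2 ^ n) (hx : x < n) :
    j ^^^ (1 <<< x) < 2 ^ n := by
  rw [pv_shift_eq]
  exact Nat.xor_lt_two_pow hj (Nat.pow_lt_pow_right (by omega) hx)

-- A's rows compute pvF
lemma pvRowsA_eq (hats : List (List Int)) (i : Nat) :
    pvRowsA (pvPeople hats) hats.length i
      = (List.range (2 ^ hats.length)).map (pvF (pvPeople hats) i) := by
  set people := pvPeople hats with hp
  set n := hats.length with hn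
  induction i with
  | zero => rfl
  | succ i ih =>
      show pvStepA people n (pvRowsA people n i) i = _
      unfold pvStepA
      rw [ih]
      apply List.map_congr_left
      intro j hj
      rw [List.mem_range] at hj
      show (people.getD i []).foldl _ _ = pvF people (i + 1) j
      unfold pvF
      rw [PySem.List.getD_map_range _ _ _ _ hj]
      apply PySem.List.foldl_congr_mem
      intro acc x hx
      by_cases hc : (1 <<< x) &&& j ≠ 0
      · rw [if_pos hc, if_pos hc]
        have hxn : x < n := by
          obtain ⟨l, hl, hx'⟩ := pv_mem_getD_nat people i x hx
          exact pvPeople_bound hats l hl x hx'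
        rw [PySem.List.getD_map_range _ _ _ _ (pv_xor_lt_pow j x n hj hxn)]
      · rw [if_neg hc, if_neg hc]

-- ---- B's cache-threaded dfs computes pvG (memoization is sound) ----

def pvInv (people : List (List Nat)) (cache : PySem.Dict (Nat × Nat) Int) : Prop :=
  ∀ i m v, PySem.Dict.get? cache (i, m) = some v → i ≤ 39 ∧ v = pvG people (40 - i) m

lemma pvDfsB_fold (people : List (List Nat)) (fuel mask : Nat)
    (hrec : ∀ m c, pvInv people c →
      (pvDfsB people fuel m c).1 = pvG people fuel m ∧
      pvInv people (pvDfsB people fuel m c).2) :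
    ∀ (l : List Nat) (st : Int × PySem.Dict (Nat × Nat) Int), pvInv people st.2 →
      (l.foldl (fun (p : Int × PySem.Dict (Nat × Nat) Int) x =>
          if (1 <<< x) &&& mask ≠ 0 then
            let q := pvDfsB people fuel (mask ^^^ (1 <<< x)) p.2
            (PySem.Int.mod (p.1 + q.1) pvMod, q.2)
          else p) st).1
        = l.foldl (fun s x => if (1 <<< x) &&& mask ≠ 0
            then PySem.Int.mod (s + pvG people fuel (mask ^^^ (1 <<< x))) pvMod else s) st.1 ∧
      pvInv people (l.foldl (fun (p : Int × PySem.Dict (Nat × Nat) Int) x =>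
          if (1 <<< x) &&& mask ≠ 0 then
            let q := pvDfsB people fuel (mask ^^^ (1 <<< x)) p.2
            (PySem.Int.mod (p.1 + q.1) pvMod, q.2)
          else p) st).2 := by
  intro l
  induction l with
  | nil => intro st h; exact ⟨rfl, h⟩
  | cons x tl ih =>
      intro st hst
      simp only [List.foldl_cons]
      by_cases hc : (1 <<< x) &&& mask ≠ 0
      · simp only [if_pos hc]
        obtain ⟨hq1, hq2⟩ := hrec (mask ^^^ (1 <<< x)) st.2 hst
        rw [hq1]
        exact ih (PySem.Int.mod
            (st.1 + pvG people fuel (mask ^^^ (1 <<< x))) pvMod,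
            (pvDfsB people fuel (mask ^^^ (1 <<< x)) st.2).2) hq2
      · simp only [if_neg hc]
        exact ih st hst

lemma pvDfsB_correct (people : List (List Nat)) :
    ∀ fuel, fuel ≤ 40 → ∀ mask cache, pvInv people cache →
      (pvDfsB people fuel mask cache).1 = pvG people fuel mask ∧
      pvInv people (pvDfsB people fuel mask cache).2 := by
  intro fuel
  induction fuel with
  | zero => intro _ mask cache hinv; exact ⟨rfl, hinv⟩
  | succ fuel ih =>
      intro hf mask cache hinv
      have hrec : ∀ m c, pvInv people c →
          (pvDfsB people fuel m c).1 = pvG people fuel m ∧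
          pvInv people (pvDfsB people fuel m c).2 :=
        fun m c hc => ih (by omega) m c hc
      have hkey : 40 - (39 - fuel) = fuel + 1 := by omega
      cases hg : PySem.Dict.get? cache (39 - fuel, mask) with
      | some v =>
          have hv := hinv _ _ _ hg
          have h1 : pvDfsB people (fuel + 1) mask cache = (v, cache) := by
            conv_lhs => rw [pvDfsB]
            rw [hg]
          rw [h1]
          refine ⟨?_, hinv⟩
          rw [hv.2, hkey]
      | none =>
          obtain ⟨h01, h02⟩ := hrec mask cache hinv
          obtain ⟨hf1, hf2⟩ := pvDfsB_fold people fuel mask hrec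
            (people.getD (39 - fuel) []) (pvDfsB people fuel mask cache) h02
          have h1 : pvDfsB people (fuel + 1) mask cache =
              (((people.getD (39 - fuel) []).foldl (fun (p : Int × PySem.Dict (Nat × Nat) Int) x =>
                  if (1 <<< x) &&& mask ≠ 0 then
                    let q := pvDfsB people fuel (mask ^^^ (1 <<< x)) p.2
                    (PySem.Int.mod (p.1 + q.1) pvMod, q.2)
                  else p) (pvDfsB people fuel mask cache)).1,
               PySem.Dict.insert
                ((people.getD (39 - fuel) []).foldl (fun (p : Int × PySem.Dict (Nat × Nat) Int) x =>
                  if (1 <<< x) &&& mask ≠ 0 then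
                    let q := pvDfsB people fuel (mask ^^^ (1 <<< x)) p.2
                    (PySem.Int.mod (p.1 + q.1) pvMod, q.2)
                  else p) (pvDfsB people fuel mask cache)).2
                (39 - fuel, mask)
                ((people.getD (39 - fuel) []).foldl (fun (p : Int × PySem.Dict (Nat × Nat) Int) x =>
                  if (1 <<< x) &&& mask ≠ 0 then
                    let q := pvDfsB people fuel (mask ^^^ (1 <<< x)) p.2
                    (PySem.Int.mod (p.1 + q.1) pvMod, q.2)
                  else p) (pvDfsB people fuel mask cache)).1) := by
            conv_lhs => rw [pvDfsB]
            rw [hg]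
          have hval : ((people.getD (39 - fuel) []).foldl (fun (p : Int × PySem.Dict (Nat × Nat) Int) x =>
              if (1 <<< x) &&& mask ≠ 0 then
                let q := pvDfsB people fuel (mask ^^^ (1 <<< x)) p.2
                (PySem.Int.mod (p.1 + q.1) pvMod, q.2)
              else p) (pvDfsB people fuel mask cache)).1 = pvG people (fuel + 1) mask := by
            rw [hf1, h01]; rfl
          rw [h1]
          refine ⟨hval, ?_⟩
          intro i m v hv
          rw [PySem.Dict.get?_insert] at hv
          by_cases he : (i, m) = (39 - fuel, mask)
          · rw [if_pos he] at hv
            rw [Prod.mk.injEq] at he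
            obtain ⟨rfl, rfl⟩ := he
            injection hv with hv
            exact ⟨by omega, by rw [hkey, ← hv]; exact hval⟩
          · rw [if_neg he] at hv
            exact hf2 _ _ _ hv

-- ---- forward table = backward recursion, via the convolution invariant ----

def pvCF (people : List (List Nat)) (i j : Nat) : ZMod 1000000007 :=
  ((pvF people i j : Int) : ZMod 1000000007)

def pvCG (people : List (List Nat)) (fuel m : Nat) : ZMod 1000000007 :=
  ((pvG people fuel m : Int) : ZMod 1000000007)

def pvT (people : List (List Nat)) (n i : Nat) : ZMod 1000000007 :=
  ∑ j ∈ Finset.range (2 ^ n),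
    pvCF people i j * pvCG people (40 - i) ((2 ^ n - 1) ^^^ j)

lemma pv_cast_pymod (a : Int) :
    ((PySem.Int.mod a pvMod : Int) : ZMod 1000000007) = (a : ZMod 1000000007) := by
  rw [show pvMod = (1000000007 : Int) from rfl,
      PySem.Int.mod_eq_emod_of_pos (by norm_num)]
  have h := ZMod.intCast_mod a 1000000007
  push_cast at h ⊢
  exact h

lemma pv_fold_mod_range (l : List Nat) (j : Nat) (t : Nat → Int) (a : Int)
    (h : 0 ≤ a ∧ a < pvMod) :
    0 ≤ l.foldl (fun s x => if (1 <<< x) &&& j ≠ 0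
        then PySem.Int.mod (s + t x) pvMod else s) a ∧
    l.foldl (fun s x => if (1 <<< x) &&& j ≠ 0
        then PySem.Int.mod (s + t x) pvMod else s) a < pvMod := by
  induction l generalizing a with
  | nil => simpa using h
  | cons x tl ih =>
      simp only [List.foldl_cons]
      by_cases hc : (1 <<< x) &&& j ≠ 0
      · rw [if_pos hc]
        exact ih _ ⟨PySem.Int.mod_nonneg _ (by norm_num [pvMod]),
          PySem.Int.mod_lt _ (by norm_num [pvMod])⟩
      · rw [if_neg hc]; exact ih _ h

lemma pv_fold_mod_cast (l : List Nat) (j : Nat) (t : Nat → Int) (a : Int) :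
    ((l.foldl (fun s x => if (1 <<< x) &&& j ≠ 0
        then PySem.Int.mod (s + t x) pvMod else s) a : Int) : ZMod 1000000007)
      = (a : ZMod 1000000007)
        + ((l.map (fun x => if (1 <<< x) &&& j ≠ 0
            then ((t x : Int) : ZMod 1000000007) else 0)).sum) := by
  induction l generalizing a with
  | nil => simp
  | cons x tl ih =>
      simp only [List.foldl_cons, List.map_cons, List.sum_cons]
      by_cases hc : (1 <<< x) &&& j ≠ 0
      · rw [if_pos hc, if_pos hc, ih, pv_cast_pymod]
        push_cast
        ring
      · rw [if_neg hc, if_neg hc, ih]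
        ring

lemma pvF_range (people : List (List Nat)) (i j : Nat) :
    0 ≤ pvF people i j ∧ pvF people i j < pvMod := by
  induction i generalizing j with
  | zero => unfold pvF; split <;> norm_num [pvMod]
  | succ i ih =>
      show 0 ≤ (people.getD i []).foldl _ _ ∧ _
      exact pv_fold_mod_range _ j _ _ (ih j)

lemma pvG_range (people : List (List Nat)) (fuel m : Nat) :
    0 ≤ pvG people fuel m ∧ pvG people fuel m < pvMod := by
  induction fuel generalizing m with
  | zero => unfold pvG; split <;> norm_num [pvMod]
  | succ fuel ih =>
      show 0 ≤ (people.getD (39 - fuel) []).foldl _ _ ∧ _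
      exact pv_fold_mod_range _ m _ _ (ih m)

lemma pv_sum_swap (l : List Nat) (s : Finset Nat) (h : Nat → Nat → ZMod 1000000007) :
    (∑ j ∈ s, (l.map (h j)).sum) = (l.map (fun x => ∑ j ∈ s, h j x)).sum := by
  induction l with
  | nil => simp
  | cons x tl ih => simp [Finset.sum_add_distrib, ih]

lemma pvCF_succ (people : List (List Nat)) (i j : Nat) :
    pvCF people (i + 1) j = pvCF people i j
      + ((people.getD i []).map (fun x => if (1 <<< x) &&& j ≠ 0
          then pvCF people i (j ^^^ (1 <<< x)) else 0)).sum := by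
  exact pv_fold_mod_cast (people.getD i []) j
    (fun x => pvF people i (j ^^^ (1 <<< x))) (pvF people i j)

lemma pvCG_succ (people : List (List Nat)) (fuel m : Nat) :
    pvCG people (fuel + 1) m = pvCG people fuel m
      + ((people.getD (39 - fuel) []).map (fun x => if (1 <<< x) &&& m ≠ 0
          then pvCG people fuel (m ^^^ (1 <<< x)) else 0)).sum := by
  exact pv_fold_mod_cast (people.getD (39 - fuel) []) m
    (fun x => pvG people fuel (m ^^^ (1 <<< x))) (pvG people fuel m)

lemma pv_cond_xor (n x : Nat) (hx : x < n) (a : Nat) :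
    ((1 <<< x) &&& ((2 ^ n - 1) ^^^ (a ^^^ (1 <<< x))) ≠ 0) ↔ ((1 <<< x) &&& a ≠ 0) := by
  rw [pv_cond_iff, pv_cond_iff]
  simp [Nat.testBit_xor, pv_shift_eq, Nat.testBit_two_pow_self,
        Nat.testBit_two_pow_sub_one, hx]

lemma pv_xor_rearrange (c a s : Nat) : (c ^^^ (a ^^^ s)) ^^^ s = c ^^^ a := by
  rw [Nat.xor_assoc, Nat.xor_assoc, Nat.xor_self, Nat.xor_zero]

lemma pv_reindex (people : List (List Nat)) (i fuel n x : Nat) (hx : x < n) :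
    ∑ j ∈ Finset.range (2 ^ n),
        (if (1 <<< x) &&& j ≠ 0 then pvCF people i (j ^^^ (1 <<< x)) else 0)
          * pvCG people fuel ((2 ^ n - 1) ^^^ j)
    = ∑ j ∈ Finset.range (2 ^ n),
        pvCF people i j *
          (if (1 <<< x) &&& ((2 ^ n - 1) ^^^ j) ≠ 0
            then pvCG people fuel (((2 ^ n - 1) ^^^ j) ^^^ (1 <<< x)) else 0) := by
  refine Finset.sum_nbij' (fun j => j ^^^ (1 <<< x)) (fun j => j ^^^ (1 <<< x))
    ?_ ?_ ?_ ?_ ?_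
  · intro a ha
    exact Finset.mem_range.2 (pv_xor_lt_pow a x n (Finset.mem_range.1 ha) hx)
  · intro a ha
    exact Finset.mem_range.2 (pv_xor_lt_pow a x n (Finset.mem_range.1 ha) hx)
  · intro a _; exact Nat.xor_xor_cancel_right _ _
  · intro a _; exact Nat.xor_xor_cancel_right _ _
  · intro a _
    simp only
    rw [pv_xor_rearrange]
    by_cases hc : (1 <<< x) &&& a ≠ 0
    · rw [if_pos hc, if_pos ((pv_cond_xor n x hx a).2 hc)]
    · rw [if_neg hc, if_neg (fun h => hc ((pv_cond_xor n x hx a).1 h))]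
      ring

lemma pvT_step (people : List (List Nat)) (n i : Nat)
    (hb : ∀ l ∈ people, ∀ x ∈ l, x < n) (hi : i < 40) :
    pvT people n (i + 1) = pvT people n i := by
  have h40 : 40 - i = (39 - i) + 1 := by omega
  have h41 : 40 - (i + 1) = 39 - i := by omega
  have h39 : 39 - (39 - i) = i := by omega
  have hxlt : ∀ x ∈ people.getD i [], x < n := by
    intro x hx
    obtain ⟨l, hl, hx'⟩ := pv_mem_getD_nat people i x hx
    exact hb l hl x hx'
  unfold pvT
  rw [h41]
  have hL : ∀ j : Nat,
      pvCF people (i + 1) j * pvCG people (39 - i) ((2 ^ n - 1) ^^^ j)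
        = pvCF people i j * pvCG people (39 - i) ((2 ^ n - 1) ^^^ j)
          + ((people.getD i []).map (fun x =>
              (if (1 <<< x) &&& j ≠ 0 then pvCF people i (j ^^^ (1 <<< x)) else 0)
                * pvCG people (39 - i) ((2 ^ n - 1) ^^^ j))).sum := by
    intro j
    rw [pvCF_succ, add_mul, List.sum_map_mul_right]
  have hR : ∀ j : Nat,
      pvCF people i j * pvCG people (40 - i) ((2 ^ n - 1) ^^^ j)
        = pvCF people i j * pvCG people (39 - i) ((2 ^ n - 1) ^^^ j)
          + ((people.getD i []).map (fun x =>
              pvCF people i j *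
                (if (1 <<< x) &&& ((2 ^ n - 1) ^^^ j) ≠ 0
                  then pvCG people (39 - i) (((2 ^ n - 1) ^^^ j) ^^^ (1 <<< x)) else 0))).sum := by
    intro j
    rw [h40, pvCG_succ, h39, mul_add, List.sum_map_mul_left]
  simp only [hL, hR, Finset.sum_add_distrib]
  congr 1
  rw [pv_sum_swap, pv_sum_swap]
  refine congrArg List.sum (List.map_congr_left ?_)
  intro x hx
  exact pv_reindex people i (39 - i) n x (hxlt x hx)

lemma pvT_zero (people : List (List Nat)) (n : Nat) :
    pvT people n 0 = pvCG people 40 (2 ^ n - 1) := by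
  unfold pvT
  rw [Finset.sum_eq_single 0]
  · simp [pvCF, pvF]
  · intro j _ hne
    have h0 : pvCF people 0 j = 0 := by simp [pvCF, pvF, hne]
    rw [h0, zero_mul]
  · intro h
    exact absurd (Finset.mem_range.2 (Nat.two_pow_pos n)) h

lemma pvT_forty (people : List (List Nat)) (n : Nat) :
    pvT people n 40 = pvCF people 40 (2 ^ n - 1) := by
  have hpos : 0 < 2 ^ n := Nat.two_pow_pos n
  unfold pvT
  rw [Finset.sum_eq_single (2 ^ n - 1)]
  · rw [Nat.xor_self]
    have h1 : pvCG people (40 - 40) 0 = 1 := by simp [pvCG, pvG]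
    rw [h1, mul_one]
  · intro j _ hne
    have hx : (2 ^ n - 1) ^^^ j ≠ 0 := by
      rw [Ne, Nat.xor_eq_zero_iff]
      exact fun h => hne h.symm
    have h0 : pvCG people (40 - 40) ((2 ^ n - 1) ^^^ j) = 0 := by
      simp [pvCG, pvG, hx]
    rw [h0, mul_zero]
  · intro h
    exact absurd (Finset.mem_range.2 (by omega)) h

lemma pvF_eq_pvG (people : List (List Nat)) (n : Nat)
    (hb : ∀ l ∈ people, ∀ x ∈ l, x < n) :
    pvF people 40 (2 ^ n - 1) = pvG people 40 (2 ^ n - 1) := by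
  have hT : ∀ k, k ≤ 40 → pvT people n k = pvT people n 0 := by
    intro k
    induction k with
    | zero => intro _; rfl
    | succ k ih =>
        intro hk
        rw [pvT_step people n k hb (by omega), ih (by omega)]
  have h : pvCF people 40 (2 ^ n - 1) = pvCG people 40 (2 ^ n - 1) :=
    (pvT_forty people n).symm.trans ((hT 40 le_rfl).trans (pvT_zero people n))
  unfold pvCF pvCG at h
  have h2 := (ZMod.intCast_eq_intCast_iff' _ _ _).1 h
  have hf := pvF_range people 40 (2 ^ n - 1)
  have hg := pvG_range people 40 (2 ^ n - 1)
  norm_num [pvMod] at h2 hf hg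
  omega

-- ===== VERDICT (by name: the statement is the Claim_ definition above) =====
theorem lc_1434_2_spec : Claim_equal_lc_1434_2 := by
  intro hats _ _
  unfold Spec_lc_1434_2 lc_1434_2 lc_1434_2_alt
  have hpos : 0 < 2 ^ hats.length := Nat.pow_pos (by omega)
  rw [pvRowsA_eq hats 40,
      PySem.List.getD_map_range _ _ _ _ (show 2 ^ hats.length - 1 < 2 ^ hats.length by omega)]
  rw [(pvDfsB_correct (pvPeople hats) 40 (by omega) (2 ^ hats.length - 1) PySem.Dict.empty
        (by intro i m v h; simp [PySem.Dict.get?, PySem.Dict.empty] at h)).1]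
  exact pvF_eq_pvG (pvPeople hats) hats.length (pvPeople_bound hats)
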